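-- pv_equiv track=rewrite | github.com/stilletto/betterBackward | peptides_with_resudes.py | mark_active_residues
-- ===== SOURCE A (Python) =====
-- from collections import Counter
--
-- def mark_active_residues(receptor_seq, active_residues):
--     residue_counter = Counter(active_residues)
--     marked_seq = []
--
--     for i, residue in enumerate(receptor_seq):
--         residue_key = i + 1  # Нумерация последовательности начинается с 1
--         if residue_key in active_residues:
--             count = residue_counter[residue_key]
--             if count == 1:
--                 marked_seq.append(f"({residue})")  # Один раз
--             elif count == 2:
--                 marked_seq.append(f"[{residue}]")  # Два раза
--             else:
--                 marked_seq.append(f"{{{residue}}}")  # Три и более раз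
--         else:
--             marked_seq.append(residue)
--
--     return ''.join(marked_seq)
-- ===== SOURCE B (Python) =====
-- from collections import Counter
--
-- def mark_active_residues(receptor_seq, active_residues):
--     n = len(receptor_seq)
--     marked = list(receptor_seq)
--     for key, count in Counter(active_residues).items():
--         if 1 <= key <= n:
--             ch = receptor_seq[key - 1]
--             if count == 1:
--                 marked[key - 1] = f"({ch})"
--             elif count == 2:
--                 marked[key - 1] = f"[{ch}]"
--             else:
--                 marked[key - 1] = f"{{{ch}}}"
--     return ''.join(marked)
-- ===== Notes on version B (the rewrite author's own statement) =====
-- stated objective: faster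
-- what changed: Instead of scanning the whole sequence and testing 'key in active_residues' (a linear list scan) per character, B builds the character list once and iterates over Counter(active_residues).items(), writing the wrapped residue at each in-range position.
import Mathlib
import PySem

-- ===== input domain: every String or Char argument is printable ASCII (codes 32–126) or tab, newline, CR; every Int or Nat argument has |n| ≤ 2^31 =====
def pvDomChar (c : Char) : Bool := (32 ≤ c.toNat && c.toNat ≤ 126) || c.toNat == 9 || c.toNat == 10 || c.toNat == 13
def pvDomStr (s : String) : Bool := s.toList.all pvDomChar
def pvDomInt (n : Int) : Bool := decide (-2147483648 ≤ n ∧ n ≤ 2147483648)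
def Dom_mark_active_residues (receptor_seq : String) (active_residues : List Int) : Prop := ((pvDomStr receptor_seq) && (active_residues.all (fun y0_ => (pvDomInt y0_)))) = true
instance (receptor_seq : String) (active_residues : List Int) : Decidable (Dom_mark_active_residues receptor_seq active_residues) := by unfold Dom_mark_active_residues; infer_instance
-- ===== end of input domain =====

-- B replaces A's per-character scan with a membership test over the whole list by a single
-- pass over Counter(active_residues).items() writing into a pre-built character list (faster).

-- ===== PORT A =====
-- literal transliteration of A: Counter, then a loop over enumerate(receptor_seq) that
-- appends one piece per character, membership tested against the list active_residues.
def mark_active_residues (receptor_seq : String) (active_residues : List Int) : String :=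
  let residue_counter := PySem.Dict.counter active_residues
  let marked_seq : List String :=
    (PySem.List.enumerate receptor_seq.toList 0).foldl
      (fun acc p =>
        let residue_key : Int := p.1 + 1
        if residue_key ∈ active_residues then
          let count := residue_counter.getD residue_key 0
          if count = 1 then acc ++ [String.ofList ['(', p.2, ')']]
          else if count = 2 then acc ++ [String.ofList ['[', p.2, ']']]
          else acc ++ [String.ofList ['{', p.2, '}']]
        else acc ++ [String.ofList [p.2]]) []
  PySem.Str.join "" marked_seq

-- ===== PORT B =====
-- B-side helper: wrap a residue char according to its multiplicity
def wrapResidue (c : Char) (count : Int) : String :=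
  if count = 1 then String.ofList ['(', c, ')']
  else if count = 2 then String.ofList ['[', c, ']']
  else String.ofList ['{', c, '}']

def mark_active_residues_alt (receptor_seq : String) (active_residues : List Int) : String :=
  let n : Int := PySem.Str.len receptor_seq
  let marked0 : List String := receptor_seq.toList.map (fun c => String.ofList [c])
  let marked :=
    (PySem.Dict.counter active_residues).items.foldl
      (fun m kc =>
        if 1 ≤ kc.1 ∧ kc.1 ≤ n then
          PySem.List.pySetD m (kc.1 - 1)
            (wrapResidue (PySem.List.pyGetD receptor_seq.toList (kc.1 - 1) ' ') kc.2)
        else m) marked0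
  PySem.Str.join "" marked

-- ===== PRECONDITION & SPEC =====
def Spec_mark_active_residues (receptor_seq : String) (active_residues : List Int) (out : String) : Prop := out = mark_active_residues_alt receptor_seq active_residues
instance (receptor_seq : String) (active_residues : List Int) (out : String) : Decidable (Spec_mark_active_residues receptor_seq active_residues out) := by unfold Spec_mark_active_residues; infer_instance

-- ===== CLAIM (what is proved, stated in full; the proofs are below) =====
def Claim_equal_mark_active_residues : Prop := ∀ (receptor_seq : String) (active_residues : List Int), Dom_mark_active_residues receptor_seq active_residues → Spec_mark_active_residues receptor_seq active_residues (mark_active_residues receptor_seq active_residues)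

-- ===== LEMMAS AND PROOFS =====

-- the per-position string A emits for index j (0-based) with character c
def markPiece (ar : List Int) (j : Int) (c : Char) : String :=
  if (j + 1) ∈ ar then wrapResidue c (ar.count (j + 1)) else String.ofList [c]

-- A's loop body appends exactly one piece per element
lemma markA_eq_map (cs : List Char) (ar : List Int) :
    (PySem.List.enumerate cs 0).foldl
      (fun acc p =>
        let residue_key : Int := p.1 + 1
        if residue_key ∈ ar then
          let count := (PySem.Dict.counter ar).getD residue_key 0
          if count = 1 then acc ++ [String.ofList ['(', p.2, ')']]
          else if count = 2 then acc ++ [String.ofList ['[', p.2, ']']]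
          else acc ++ [String.ofList ['{', p.2, '}']]
        else acc ++ [String.ofList [p.2]]) [] =
      (PySem.List.enumerate cs 0).map (fun p => markPiece ar p.1 p.2) := by
  have hbody : (fun (acc : List String) (p : Int × Char) =>
        let residue_key : Int := p.1 + 1
        if residue_key ∈ ar then
          let count := (PySem.Dict.counter ar).getD residue_key 0
          if count = 1 then acc ++ [String.ofList ['(', p.2, ')']]
          else if count = 2 then acc ++ [String.ofList ['[', p.2, ']']]
          else acc ++ [String.ofList ['{', p.2, '}']]
        else acc ++ [String.ofList [p.2]]) =
      (fun acc p => acc ++ [markPiece ar p.1 p.2]) := by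
    funext acc p
    simp only [markPiece, wrapResidue, PySem.Dict.getD_counter]
    split_ifs <;> rfl
  rw [hbody, PySem.List.foldl_append_singleton_eq_map, List.nil_append]

-- B's fold over distinct keys, characterised elementwise
lemma foldl_set_getElem? (cs : List Char) (w : Int → String) :
    ∀ (ks : List Int), ks.Nodup → ∀ (m : List String), m.length = cs.length → ∀ j : Nat,
      (ks.foldl (fun m k =>
          if 1 ≤ k ∧ k ≤ (cs.length : Int) then PySem.List.pySetD m (k - 1) (w k) else m) m)[j]? =
        if ((j : Int) + 1) ∈ ks ∧ j < cs.length then some (w ((j : Int) + 1)) else m[j]? := by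
  intro ks
  induction ks with
  | nil => intro _ m _ j; simp
  | cons k ks ih =>
    intro hnd m hm j
    obtain ⟨hk, hnd'⟩ := List.nodup_cons.mp hnd
    set m' := if 1 ≤ k ∧ k ≤ (cs.length : Int) then PySem.List.pySetD m (k - 1) (w k) else m with hm'def
    have hlen : m'.length = cs.length := by
      rw [hm'def]; split_ifs with hg
      · rcases hg with ⟨h1, _⟩
        rw [PySem.List.pySetD_of_nonneg _ _ (by omega)]
        simpa using hm
      · exact hm
    have hstep : m'[j]? = if ((j : Int) + 1) = k ∧ j < cs.length then some (w k) else m[j]? := by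
      by_cases hkj : ((j : Int) + 1) = k
      · subst hkj
        by_cases hj : j < cs.length
        · rw [hm'def, if_pos ⟨by omega, by omega⟩, PySem.List.pySetD_of_nonneg _ _ (by omega)]
          have htn : ((j : Int) + 1 - 1).toNat = j := by omega
          rw [htn, if_pos ⟨rfl, hj⟩]
          exact List.getElem?_set_self (by omega)
        · rw [hm'def, if_neg (by omega), if_neg (by simp [hj])]
      · rw [if_neg (fun h => hkj h.1), hm'def]
        by_cases hg : 1 ≤ k ∧ k ≤ (cs.length : Int)
        · rw [if_pos hg, PySem.List.pySetD_of_nonneg _ _ (by omega)]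
          exact List.getElem?_set_ne (by omega)
        · rw [if_neg hg]
    rw [List.foldl_cons, ← hm'def, ih hnd' m' hlen j, hstep]
    by_cases hj : j < cs.length
    · by_cases hmem : ((j : Int) + 1) ∈ ks
      · simp [hmem, hj, List.mem_cons]
      · by_cases hkj : ((j : Int) + 1) = k
        · simp [hj, hkj]
        · simp [hmem, hj, hkj, List.mem_cons]
    · simp [hj]

-- the two joined lists agree at every position
lemma marked_lists_eq (cs : List Char) (ar : List Int) :
    (PySem.Dict.counter ar).items.foldl
      (fun m kc =>
        if 1 ≤ kc.1 ∧ kc.1 ≤ ((cs.length : Int)) then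
          PySem.List.pySetD m (kc.1 - 1)
            (wrapResidue (PySem.List.pyGetD cs (kc.1 - 1) ' ') kc.2)
        else m) (cs.map (fun c => String.ofList [c])) =
    (PySem.List.enumerate cs 0).map (fun p => markPiece ar p.1 p.2) := by
  apply List.ext_getElem?
  intro j
  rw [PySem.Dict.items_counter, List.foldl_map]
  have hfold := foldl_set_getElem? cs
      (fun k => wrapResidue (PySem.List.pyGetD cs (k - 1) ' ') (ar.count k))
      (PySem.Set.ofList ar) (PySem.Set.nodup_ofList ar)
      (cs.map (fun c => String.ofList [c])) (by simp) j
  rw [hfold]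
  simp only [List.getElem?_map, PySem.List.getElem?_enumerate]
  simp only [PySem.Set.mem_ofList]
  by_cases hj : j < cs.length
  · have hcs : cs[j]? = some cs[j] := List.getElem?_eq_getElem hj
    rw [hcs]
    simp only [Option.map_some, markPiece, zero_add]
    by_cases hmem : ((j : Int) + 1) ∈ ar
    · rw [if_pos ⟨hmem, hj⟩, if_pos hmem]
      have h1 : ((j : Int) + 1 - 1) = ((j : Nat) : Int) := by omega
      rw [h1, PySem.List.pyGetD_natCast]
      rw [List.getD_eq_getElem?_getD, hcs]
      rfl
    · rw [if_neg (by simp [hmem]), if_neg hmem]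
  · have hnone : cs[j]? = none := by rw [List.getElem?_eq_none_iff]; omega
    rw [if_neg (by simp [hj]), hnone]
    simp

-- ===== VERDICT (by name: the statement is the Claim_ definition above) =====
theorem mark_active_residues_spec : Claim_equal_mark_active_residues := by
  intro receptor_seq active_residues _
  unfold Spec_mark_active_residues mark_active_residues mark_active_residues_alt
  simp only [PySem.Str.len_eq]
  rw [markA_eq_map]
  exact congrArg (PySem.Str.join "") (marked_lists_eq receptor_seq.toList active_residues).symm
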